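-- pv_equiv track=rewrite | github.com/pkali/madmads | scripts/asmout_postprocess.py | convert_parens_to_brackets
-- ===== SOURCE A (Python) =====
-- def convert_parens_to_brackets(text: str) -> str:
--     out: list[str] = []
--     in_quote: str | None = None
--
--     for ch in text:
--         if in_quote is not None:
--             out.append(ch)
--             if ch == in_quote:
--                 in_quote = None
--             continue
--
--         if ch in {'"', "'"}:
--             in_quote = ch
--             out.append(ch)
--             continue
--
--         if ch == '(':
--             out.append('[')
--             continue
--         if ch == ')':
--             out.append(']')
--             continue
--
--         out.append(ch)
--
--     return ''.join(out)
-- ===== SOURCE B (Python) =====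
-- def convert_parens_to_brackets(text: str) -> str:
--     # Span-based: find the next quote, translate the unquoted chunk wholesale,
--     # copy the quoted span verbatim, repeat.
--     table = str.maketrans('()', '[]')
--     parts = []
--     rest = text
--     while True:
--         i = next((k for k, c in enumerate(rest) if c in '\'"'), None)
--         if i is None:
--             parts.append(rest.translate(table))
--             break
--         tail = rest[i + 1:]
--         j = tail.find(rest[i])
--         if j == -1:
--             parts.append(rest[:i].translate(table))
--             parts.append(rest[i:])
--             break
--         parts.append(rest[:i].translate(table))
--         parts.append(rest[i:i + j + 2])
--         rest = tail[j + 1:]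
--     return ''.join(parts)
-- ===== Notes on version B (the rewrite author's own statement) =====
-- stated objective: alternative
-- what changed: Replaces A's per-character quote-state machine by span-based scanning: find the next quote, translate the whole unquoted chunk via str.translate, copy the quoted span verbatim, and loop on the remainder.
import Mathlib
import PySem

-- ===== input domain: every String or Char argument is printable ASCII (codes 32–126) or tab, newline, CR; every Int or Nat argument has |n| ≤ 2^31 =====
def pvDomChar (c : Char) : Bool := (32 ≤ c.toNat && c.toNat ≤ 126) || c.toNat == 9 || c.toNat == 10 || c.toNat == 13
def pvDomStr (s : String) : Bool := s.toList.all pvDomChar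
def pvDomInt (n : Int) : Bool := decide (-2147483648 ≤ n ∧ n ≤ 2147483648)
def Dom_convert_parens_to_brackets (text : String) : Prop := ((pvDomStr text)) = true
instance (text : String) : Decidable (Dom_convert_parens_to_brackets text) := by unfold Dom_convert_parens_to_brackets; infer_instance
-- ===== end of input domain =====

-- B replaces A's per-character quote state machine by span-based scanning (find next
-- quote, translate the unquoted chunk wholesale, copy the quoted span verbatim): an
-- alternative decomposition, same asymptotic cost.

-- ===== PORT A =====
-- A's loop body, state = (out, in_quote); each branch in A's order.
def pvAStep (st : List Char × Option Char) (ch : Char) : List Char × Option Char :=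
  match st.2 with
  | some q => (st.1 ++ [ch], if ch == q then none else some q)
  | none =>
    if ch == '"' || ch == '\'' then (st.1 ++ [ch], some ch)
    else if ch == '(' then (st.1 ++ ['['], none)
    else if ch == ')' then (st.1 ++ [']'], none)
    else (st.1 ++ [ch], none)

def convert_parens_to_brackets (text : String) : String :=
  String.mk (text.toList.foldl pvAStep ([], none)).1

-- ===== PORT B =====
-- '(' ↦ '[' , ')' ↦ ']' : str.maketrans('()', '[]'); chunk.translate(table) = map pvRepl (exact on chars)
def pvRepl (c : Char) : Char := if c == '(' then '[' else if c == ')' then ']' else c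

def pvIsQuote (c : Char) : Bool := c == '\'' || c == '"'

-- Source B's while loop as recursion on the remaining string (as a char list;
-- next(...enumerate...) = findIdx?, tail.find(q) = findIdx? (· == q), slices = take/drop,
-- rest[i] = getD i ' ' — i is always in range when that branch is reached).
def pvBGo (rest : List Char) : List Char :=
  match h1 : rest.findIdx? pvIsQuote with
  | none => rest.map pvRepl
  | some i =>
    match h2 : (rest.drop (i + 1)).findIdx? (· == rest.getD i ' ') with
    | none => (rest.take i).map pvRepl ++ rest.drop i
    | some j => (rest.take i).map pvRepl ++ (rest.drop i).take (j + 2) ++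
        pvBGo ((rest.drop (i + 1)).drop (j + 1))
termination_by rest.length
decreasing_by
  have hne : rest ≠ [] := by intro hn; subst hn; simp at h1
  have : 0 < rest.length := List.length_pos_iff.mpr hne
  simp only [List.length_drop]
  omega

def convert_parens_to_brackets_alt (text : String) : String :=
  String.mk (pvBGo text.toList)

-- ===== PRECONDITION & SPEC =====
def Spec_convert_parens_to_brackets (text : String) (out : String) : Prop := out = convert_parens_to_brackets_alt text
instance (text : String) (out : String) : Decidable (Spec_convert_parens_to_brackets text out) := by unfold Spec_convert_parens_to_brackets; infer_instance

-- ===== CLAIM (what is proved, stated in full; the proofs are below) =====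
def Claim_equal_convert_parens_to_brackets : Prop := ∀ (text : String), Dom_convert_parens_to_brackets text → Spec_convert_parens_to_brackets text (convert_parens_to_brackets text)

-- ===== LEMMAS AND PROOFS =====

-- accumulator lemma for A's fold
theorem pvA_acc (s : List Char) : ∀ (out : List Char) (q : Option Char),
    s.foldl pvAStep (out, q) = (out ++ (s.foldl pvAStep ([], q)).1, (s.foldl pvAStep ([], q)).2) := by
  induction s with
  | nil => intro out q; simp
  | cons c t ih =>
    intro out q
    simp only [List.foldl_cons]
    rw [ih (pvAStep (out, q) c).1 (pvAStep (out, q) c).2,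
        ih (pvAStep ([], q) c).1 (pvAStep ([], q) c).2]
    have : (pvAStep (out, q) c).1 = out ++ (pvAStep ([], q) c).1 ∧
           (pvAStep (out, q) c).2 = (pvAStep ([], q) c).2 := by
      unfold pvAStep
      cases q
      · simp only []
        split_ifs <;> simp
      · simp
    rw [this.1, this.2, List.append_assoc]

-- from state none over a quote-free chunk A maps pvRepl and stays in none
theorem pvA_nonquote (s : List Char) (h : ∀ c ∈ s, pvIsQuote c = false) :
    s.foldl pvAStep ([], none) = (s.map pvRepl, none) := by
  induction s with
  | nil => simp
  | cons c t ih =>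
    have hc : pvIsQuote c = false := h c (by simp)
    have ht : ∀ x ∈ t, pvIsQuote x = false := fun x hx => h x (by simp [hx])
    simp only [List.foldl_cons, List.map_cons]
    have hstep : pvAStep ([], none) c = ([pvRepl c], none) := by
      unfold pvAStep pvRepl
      simp only [pvIsQuote] at hc
      rw [Bool.or_comm] at hc
      simp only [hc, Bool.false_eq_true, if_false]
      split_ifs <;> rfl
    rw [hstep, pvA_acc, ih ht]
    simp

-- from quote state q, a chunk with no q passes through verbatim
theorem pvA_inquote (q : Char) (s : List Char) (h : ∀ c ∈ s, (c == q) = false) :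
    s.foldl pvAStep ([], some q) = (s, some q) := by
  induction s with
  | nil => simp
  | cons c t ih =>
    have hc := h c (by simp)
    have ht : ∀ x ∈ t, (x == q) = false := fun x hx => h x (by simp [hx])
    simp only [List.foldl_cons]
    have hstep : pvAStep ([], some q) c = ([c], some q) := by
      unfold pvAStep; simp [hc]
    rw [hstep, pvA_acc, ih ht]
    simp

theorem pvB_eq_A (s : List Char) : pvBGo s = (s.foldl pvAStep ([], none)).1 := by
  induction s using pvBGo.induct with
  | case1 rest hnone =>
    have hall : ∀ c ∈ rest, pvIsQuote c = false := by
      simpa using List.findIdx?_eq_none_iff.mp hnone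
    rw [pvBGo.eq_def, pvA_nonquote rest hall]
    split
    · rfl
    · next i heq => rw [hnone] at heq; simp at heq
  | case2 rest i hfind hnone =>
    obtain ⟨hi, hq, hpre⟩ := List.findIdx?_eq_some_iff_getElem.mp hfind
    have hqd : rest.getD i ' ' = rest[i] := by
      simp [List.getD_eq_getElem?_getD, hi]
    have hnone' := hnone
    rw [hqd] at hnone'
    have hpref : ∀ c ∈ rest.take i, pvIsQuote c = false := by
      intro c hc
      obtain ⟨k, hk, hke⟩ := List.getElem_of_mem hc
      have hki : k < i := lt_of_lt_of_le hk (by simp)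
      have := hpre k hki
      rw [List.getElem_take] at hke
      rw [← hke]; simpa using this
    have htl : ∀ c ∈ rest.drop (i + 1), (c == rest[i]) = false := by
      intro c hc
      have := List.findIdx?_eq_none_iff.mp hnone' c hc
      simpa using this
    have hsplit : rest = rest.take i ++ rest[i] :: rest.drop (i + 1) := by
      conv_lhs => rw [← List.take_append_drop i rest]
      rw [List.drop_eq_getElem_cons hi]
    have hstep : pvAStep ((rest.take i).map pvRepl, none) rest[i] =
        ((rest.take i).map pvRepl ++ [rest[i]], some rest[i]) := by
      unfold pvAStep
      have : pvIsQuote rest[i] = true := hq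
      simp only [pvIsQuote, Bool.or_eq_true, beq_iff_eq] at this
      rcases this with h' | h' <;> simp [h']
    conv_rhs => rw [hsplit]
    rw [List.foldl_append, pvA_nonquote _ hpref, List.foldl_cons, hstep, pvA_acc,
        pvA_inquote rest[i] (rest.drop (i + 1)) htl]
    rw [pvBGo.eq_def]
    split
    · next heq => rw [hfind] at heq; simp at heq
    · next i' heq =>
      rw [hfind] at heq
      obtain rfl : i' = i := by injection heq with h; exact h.symm
      split
      · rw [List.drop_eq_getElem_cons hi]
        simp
      · next j heq2 => rw [hnone] at heq2; simp at heq2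
  | case3 rest i hfind j hsome ih =>
    obtain ⟨hi, hq, hpre⟩ := List.findIdx?_eq_some_iff_getElem.mp hfind
    have hqd : rest.getD i ' ' = rest[i] := by
      simp [List.getD_eq_getElem?_getD, hi]
    have hsome' := hsome
    rw [hqd] at hsome'
    obtain ⟨hj, hjq, hjpre⟩ := List.findIdx?_eq_some_iff_getElem.mp hsome'
    have hpref : ∀ c ∈ rest.take i, pvIsQuote c = false := by
      intro c hc
      obtain ⟨k, hk, hke⟩ := List.getElem_of_mem hc
      have hki : k < i := lt_of_lt_of_le hk (by simp)
      have := hpre k hki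
      rw [List.getElem_take] at hke
      rw [← hke]; simpa using this
    have htl : ∀ c ∈ (rest.drop (i + 1)).take j, (c == rest[i]) = false := by
      intro c hc
      obtain ⟨k, hk, hke⟩ := List.getElem_of_mem hc
      have hkj : k < j := lt_of_lt_of_le hk (by simp)
      have := hjpre k hkj
      rw [List.getElem_take] at hke
      rw [← hke]; simpa using this
    have hsplit : rest = rest.take i ++ rest[i] ::
        ((rest.drop (i + 1)).take j ++ (rest.drop (i + 1))[j] :: (rest.drop (i + 1)).drop (j + 1)) := by
      conv_lhs => rw [← List.take_append_drop i rest]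
      rw [List.drop_eq_getElem_cons hi]
      congr 2
      conv_lhs => rw [← List.take_append_drop j (rest.drop (i + 1))]
      rw [List.drop_eq_getElem_cons hj]
    have hstep : pvAStep ((rest.take i).map pvRepl, none) rest[i] =
        ((rest.take i).map pvRepl ++ [rest[i]], some rest[i]) := by
      unfold pvAStep
      have : pvIsQuote rest[i] = true := hq
      simp only [pvIsQuote, Bool.or_eq_true, beq_iff_eq] at this
      rcases this with h' | h' <;> simp [h']
    have hdropi : (rest.drop i).take (j + 2) =
        rest[i] :: ((rest.drop (i + 1)).take j ++ [(rest.drop (i + 1))[j]]) := by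
      rw [List.drop_eq_getElem_cons hi, List.take_cons (by omega : 0 < j + 2)]
      congr 1
      have h21 : j + 2 - 1 = j + 1 := by omega
      rw [h21, List.take_succ, List.getElem?_eq_getElem hj]
      simp
    have hjq' : (rest.drop (i + 1))[j] = rest[i] := beq_iff_eq.mp hjq
    have hstep2 : pvAStep ((rest.drop (i + 1)).take j, some rest[i]) (rest.drop (i + 1))[j] =
        ((rest.drop (i + 1)).take j ++ [(rest.drop (i + 1))[j]], none) := by
      unfold pvAStep; simp [hjq']
    conv_rhs => rw [hsplit]
    rw [List.foldl_append, pvA_nonquote _ hpref, List.foldl_cons, hstep, pvA_acc,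
        List.foldl_append, pvA_inquote rest[i] _ htl, List.foldl_cons, hstep2, pvA_acc]
    rw [pvBGo.eq_def]
    split
    · next heq => rw [hfind] at heq; simp at heq
    · next i' heq =>
      rw [hfind] at heq
      obtain rfl : i' = i := by injection heq with h; exact h.symm
      split
      · next heq2 => rw [hsome] at heq2; simp at heq2
      · next j' heq2 =>
        rw [hsome] at heq2
        obtain rfl : j' = j := by injection heq2 with h; exact h.symm
        rw [ih, hdropi]
        simp

-- ===== VERDICT (by name: the statement is the Claim_ definition above) =====
theorem convert_parens_to_brackets_spec : Claim_equal_convert_parens_to_brackets := by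
  intro text _
  show _ = _
  unfold convert_parens_to_brackets convert_parens_to_brackets_alt
  rw [pvB_eq_A]
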